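-- pv_equiv track=rewrite | github.com/YEOMSSS/my_python_practice | 0002.3_gpt_poker.py | validate_replace_input
-- ===== SOURCE A (Python) =====
-- def validate_replace_input(user_input, hand_size):
--     if user_input == "":
--         return []
--     tokens = user_input.split()
--     if not all(x.isdigit() for x in tokens): return None
--     nums = [int(x) for x in tokens]
--     if len(set(nums)) != len(nums): return None
--     if not all(1 <= x <= hand_size for x in nums): return None
--     if len(nums) > 5: return None
--     return nums
-- ===== SOURCE B (Python) =====
-- def validate_replace_input(user_input, hand_size):
--     nums = []
--     seen = set()
--     for tok in user_input.split():
--         if not tok.isdigit():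
--             return None
--         n = int(tok)
--         if n in seen or not (1 <= n <= hand_size):
--             return None
--         seen.add(n)
--         nums.append(n)
--     return None if len(nums) > 5 else nums
-- ===== Notes on version B (the rewrite author's own statement) =====
-- stated objective: simpler
-- what changed: Replaces A's early-return chain of four separate passes over the token list (isdigit scan, int mapping, set-size duplicate check, range scan) with one loop over the tokens that validates, parses and dedup-checks each token incrementally against a growing seen-set.
import Mathlib
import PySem

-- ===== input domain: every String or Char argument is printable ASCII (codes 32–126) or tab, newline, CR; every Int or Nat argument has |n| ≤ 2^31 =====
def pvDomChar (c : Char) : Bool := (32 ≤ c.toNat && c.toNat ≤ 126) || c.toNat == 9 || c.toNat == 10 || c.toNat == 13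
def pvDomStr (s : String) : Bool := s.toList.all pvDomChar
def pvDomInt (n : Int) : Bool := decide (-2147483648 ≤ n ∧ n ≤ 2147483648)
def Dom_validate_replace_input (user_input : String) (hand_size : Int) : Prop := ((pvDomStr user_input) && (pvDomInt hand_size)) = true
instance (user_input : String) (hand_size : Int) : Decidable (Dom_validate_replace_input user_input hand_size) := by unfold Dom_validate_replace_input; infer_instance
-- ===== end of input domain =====

-- B is SIMPLER: one incremental loop over the tokens (validate, parse, dedup-check per token)
-- instead of A's four separate passes; same O(n) cost, same return value everywhere.

-- shared helper: int(x) for a token already checked to be all digits (ofStr? cannot be none there)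
def pvParse (x : String) : Int := (PySem.Int.ofStr? x).getD 0

-- ===== PORT A =====
def validate_replace_input (user_input : String) (hand_size : Int) : Option (List Int) :=
  if user_input = "" then some []
  else
    let tokens := PySem.Str.split₀ user_input
    if !(tokens.all (fun x => PySem.Str.strIsdigit x)) then none
    else
      let nums := tokens.map pvParse
      if (PySem.Set.ofList nums).length ≠ nums.length then none
      else if !(nums.all (fun x => decide (1 ≤ x) && decide (x ≤ hand_size))) then none
      else if nums.length > 5 then none
      else some nums

-- ===== PORT B =====
def pvAltLoop (hand_size : Int) : List String → PySem.Set Int → List Int → Option (List Int)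
  | [], _, nums => if nums.length > 5 then none else some nums
  | tok :: rest, seen, nums =>
    if !(PySem.Str.strIsdigit tok) then none
    else
      let n := pvParse tok
      if PySem.Set.contains seen n || !(decide (1 ≤ n) && decide (n ≤ hand_size)) then none
      else pvAltLoop hand_size rest (PySem.Set.add seen n) (nums ++ [n])

def validate_replace_input_alt (user_input : String) (hand_size : Int) : Option (List Int) :=
  pvAltLoop hand_size (PySem.Str.split₀ user_input) PySem.Set.empty []

-- ===== PRECONDITION & SPEC =====
def Spec_validate_replace_input (user_input : String) (hand_size : Int) (out : Option (List Int)) : Prop := out = validate_replace_input_alt user_input hand_size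
instance (user_input : String) (hand_size : Int) (out : Option (List Int)) : Decidable (Spec_validate_replace_input user_input hand_size out) := by unfold Spec_validate_replace_input; infer_instance

-- ===== CLAIM (what is proved, stated in full; the proofs are below) =====
def Claim_equal_validate_replace_input : Prop := ∀ (user_input : String) (hand_size : Int), Dom_validate_replace_input user_input hand_size → Spec_validate_replace_input user_input hand_size (validate_replace_input user_input hand_size)

-- ===== LEMMAS AND PROOFS =====

lemma pv_ofList_sublist {α : Type} [BEq α] [LawfulBEq α] (xs : List α) :
    (PySem.Set.ofList xs).Sublist xs := by
  induction xs using List.reverseRecOn with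
  | nil => simp [PySem.Set.ofList_nil]
  | append_singleton ys y ih =>
    rw [PySem.Set.ofList_append_singleton]
    unfold PySem.Set.add
    split
    · exact ih.trans (List.sublist_append_left ys [y])
    · exact ih.append_right [y]

lemma pv_length_ofList_eq_iff {α : Type} [BEq α] [LawfulBEq α] (xs : List α) :
    (PySem.Set.ofList xs).length = xs.length ↔ xs.Nodup := by
  constructor
  · intro h
    have := (pv_ofList_sublist xs).eq_of_length h
    rw [← this]
    exact PySem.Set.nodup_ofList xs
  · intro h
    rw [PySem.Set.ofList_eq_self_of_nodup _ h]

lemma pv_loop_eq (hs : Int) (tokens : List String) (nums : List Int)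
    (hnd : nums.Nodup) :
    pvAltLoop hs tokens (PySem.Set.ofList nums) nums =
      if (tokens.all (fun x => PySem.Str.strIsdigit x)) = true ∧
         (nums ++ tokens.map pvParse).Nodup ∧
         (∀ x ∈ tokens.map pvParse, 1 ≤ x ∧ x ≤ hs) ∧
         (nums ++ tokens.map pvParse).length ≤ 5
      then some (nums ++ tokens.map pvParse) else none := by
  induction tokens generalizing nums with
  | nil =>
    simp [pvAltLoop, hnd]
    split_ifs with h1 h2 <;> first | rfl | omega
  | cons tok rest ih =>
    by_cases hd : PySem.Str.strIsdigit tok = true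
    · simp only [pvAltLoop, hd, Bool.not_true, Bool.false_eq_true, if_false]
      by_cases hmem : pvParse tok ∈ nums
      · have : PySem.Set.contains (PySem.Set.ofList nums) (pvParse tok) = true := by
          rw [PySem.Set.contains_iff, PySem.Set.mem_ofList]; exact hmem
        simp only [this, Bool.true_or, if_true]
        rw [if_neg]
        rintro ⟨-, h2, -, -⟩
        rw [List.map_cons] at h2
        have := (List.nodup_append.mp h2).2.2
        exact absurd rfl (by
          have hx := this (pvParse tok) hmem (pvParse tok) (List.mem_cons_self ..)
          exact hx)
      · have hc : PySem.Set.contains (PySem.Set.ofList nums) (pvParse tok) = false := by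
          rw [Bool.eq_false_iff]
          intro h; rw [PySem.Set.contains_iff, PySem.Set.mem_ofList] at h; exact hmem h
        by_cases hr : 1 ≤ pvParse tok ∧ pvParse tok ≤ hs
        · have : (PySem.Set.contains (PySem.Set.ofList nums) (pvParse tok) ||
              !(decide (1 ≤ pvParse tok) && decide (pvParse tok ≤ hs))) = false := by
            simp [hr.1, hr.2, hmem]
          rw [if_neg (by rw [this]; simp)]
          rw [← PySem.Set.ofList_append_singleton]
          have hnd' : (nums ++ [pvParse tok]).Nodup :=
            (List.Perm.nodup_iff (List.perm_append_singleton _ _)).mpr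
              (List.nodup_cons.mpr ⟨hmem, hnd⟩)
          rw [ih (nums ++ [pvParse tok]) hnd']
          have hlist : nums ++ [pvParse tok] ++ rest.map pvParse
              = nums ++ (tok :: rest).map pvParse := by simp
          rw [hlist]
          congr 1
          simp only [eq_iff_iff]
          constructor
          · rintro ⟨ha, hb, hcc, hdd⟩
            refine ⟨by rw [List.all_cons, Bool.and_eq_true]; exact ⟨hd, ha⟩, hb, ?_, hdd⟩
            intro x hx
            rw [List.map_cons, List.mem_cons] at hx
            rcases hx with rfl | hx
            · exact hr
            · exact hcc x hx
          · rintro ⟨ha, hb, hcc, hdd⟩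
            rw [List.all_cons, Bool.and_eq_true] at ha
            refine ⟨ha.2, hb, ?_, hdd⟩
            intro x hx
            exact hcc x (by rw [List.map_cons]; exact List.mem_cons_of_mem _ hx)
        · have : (PySem.Set.contains (PySem.Set.ofList nums) (pvParse tok) ||
              !(decide (1 ≤ pvParse tok) && decide (pvParse tok ≤ hs))) = true := by
            rcases (not_and_or.mp hr) with h | h <;> simp [h]
          rw [if_pos this]
          rw [if_neg]
          rintro ⟨-, -, h3, -⟩
          exact hr (h3 (pvParse tok) (by simp))
    · simp only [pvAltLoop, hd]
      rw [if_pos (by simp), if_neg]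
      rintro ⟨h1, -, -, -⟩
      rw [List.all_cons] at h1
      simp at h1
      exact hd (by simpa using h1.1)

lemma pv_split₀_empty : PySem.Str.split₀ "" = [] := by decide

-- ===== VERDICT (by name: the statement is the Claim_ definition above) =====
theorem validate_replace_input_spec : Claim_equal_validate_replace_input := by
  intro user_input hand_size _
  unfold Spec_validate_replace_input validate_replace_input validate_replace_input_alt
  have hloop := pv_loop_eq hand_size (PySem.Str.split₀ user_input) [] List.nodup_nil
  rw [PySem.Set.ofList_nil] at hloop
  rw [show (PySem.Set.empty : PySem.Set Int) = [] from rfl, hloop]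
  by_cases he : user_input = ""
  · subst he
    rw [pv_split₀_empty]
    simp
  · rw [if_neg he]
    set tokens := PySem.Str.split₀ user_input with htok
    by_cases h1 : (tokens.all (fun x => PySem.Str.strIsdigit x)) = true
    · rw [if_neg (by
        simp only [Bool.not_eq_true', Bool.not_eq_false]
        exact h1)]
      set nums := tokens.map pvParse with hnums
      by_cases h2 : nums.Nodup
      · rw [if_neg (by rw [Ne, pv_length_ofList_eq_iff]; simp [h2])]
        by_cases h3 : ∀ x ∈ nums, 1 ≤ x ∧ x ≤ hand_size
        · rw [if_neg (by
            simp only [Bool.not_eq_true', Bool.not_eq_false, List.all_eq_true]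
            intro x hx; have := h3 x hx; simp [this.1, this.2])]
          by_cases h4 : nums.length > 5
          · rw [if_pos h4, if_neg (by rintro ⟨-, -, -, h⟩; simp at h; omega)]
          · rw [if_neg h4, if_pos ⟨h1, by simpa using h2, by simpa using h3, by simp; omega⟩]
            simp
        · rw [if_pos (by
            push_neg at h3
            obtain ⟨x, hx, hxr⟩ := h3
            simp only [Bool.not_eq_true', Bool.not_eq_false]
            rw [Bool.eq_false_iff]
            intro hall
            rw [List.all_eq_true] at hall
            have := hall x hx
            simp at this
            omega)]
          rw [if_neg (by rintro ⟨-, -, h, -⟩; exact h3 (by simpa using h))]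
      · rw [if_pos (by rw [Ne, pv_length_ofList_eq_iff]; simp [h2]),
            if_neg (by rintro ⟨-, h, -, -⟩; simp at h; exact h2 (by simpa using h))]
    · have h1' : tokens.all (fun x => PySem.Str.strIsdigit x) = false := Bool.eq_false_iff.mpr h1
      rw [List.all_eq_false] at h1'
      obtain ⟨x, hx, hpx⟩ := h1'
      rw [if_pos (by simp only [Bool.not_eq_true']; rw [List.all_eq_false]; exact ⟨x, hx, hpx⟩),
          if_neg (by rintro ⟨h, -⟩; exact h1 h)]
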